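-- pv_equiv track=rewrite | github.com/lirmag/All-works | ege_jan_2var/22.py | f
-- ===== SOURCE A (Python) =====
-- def f(x):
--     a = 0
--     b = 10
--     while x > 0:
--         d = x % 6
--         if d > a:
--             a = d
--         if d < b:
--             b = d
--         x = x // 6
--     return a + b
-- ===== SOURCE B (Python) =====
-- def f(x):
--     digits = []
--     while x > 0:
--         digits.append(x % 6)
--         x //= 6
--     return max(digits, default=0) + min(digits, default=10)
-- ===== Notes on version B (the rewrite author's own statement) =====
-- stated objective: simpler
-- what changed: B first materialises the base-6 digit list, then takes max(digits, default=0) + min(digits, default=10), replacing A's single loop that maintains running max/min state.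
import Mathlib
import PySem

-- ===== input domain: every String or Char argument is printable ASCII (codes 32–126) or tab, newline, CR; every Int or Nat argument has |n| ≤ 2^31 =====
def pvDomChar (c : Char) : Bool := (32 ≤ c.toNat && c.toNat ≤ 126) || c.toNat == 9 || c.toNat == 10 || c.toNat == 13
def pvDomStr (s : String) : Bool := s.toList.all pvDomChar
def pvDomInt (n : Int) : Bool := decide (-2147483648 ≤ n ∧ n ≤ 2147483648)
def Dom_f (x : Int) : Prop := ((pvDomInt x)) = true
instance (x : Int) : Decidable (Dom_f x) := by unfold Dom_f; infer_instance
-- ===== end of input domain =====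

-- B replaces A's single loop with running max/min by building the base-6 digit list and
-- scanning it twice with max/min (defaults 0 and 10): simpler decomposition, same cost.

-- ===== PORT A =====
-- the while loop of A, state (a, b)
def fLoop (x a b : Int) : Int :=
  if _h : x > 0 then
    let d := PySem.Int.mod x 6
    fLoop (PySem.Int.floordiv x 6)
      (if d > a then d else a)
      (if d < b then d else b)
  else a + b
termination_by x.toNat
decreasing_by
  rw [PySem.Int.floordiv_eq_ediv_of_pos (by omega)]
  omega

def f (x : Int) : Int := fLoop x 0 10

-- ===== PORT B =====
-- the digit-collecting while loop of B
def fDigits (x : Int) : List Int :=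
  if _h : x > 0 then
    PySem.Int.mod x 6 :: fDigits (PySem.Int.floordiv x 6)
  else []
termination_by x.toNat
decreasing_by
  rw [PySem.Int.floordiv_eq_ediv_of_pos (by omega)]
  omega

def f_alt (x : Int) : Int :=
  (PySem.List.max? (fDigits x) (fun y => y)).getD 0
    + (PySem.List.min? (fDigits x) (fun y => y)).getD 10

-- ===== PRECONDITION & SPEC =====
def Spec_f (x : Int) (out : Int) : Prop := out = f_alt x
instance (x : Int) (out : Int) : Decidable (Spec_f x out) := by unfold Spec_f; infer_instance

-- ===== CLAIM (what is proved, stated in full; the proofs are below) =====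
def Claim_equal_f : Prop := ∀ (x : Int), Dom_f x → Spec_f x (f x)

-- ===== LEMMAS AND PROOFS =====

-- A's loop equals the two folds over the digit list
theorem fLoop_eq_folds (n : Nat) (x a b : Int) (hn : x.toNat ≤ n) :
    fLoop x a b = (fDigits x).foldl max a + (fDigits x).foldl min b := by
  induction n generalizing x a b with
  | zero =>
    rw [fLoop, fDigits]
    have hx : ¬ x > 0 := by omega
    simp [hx]
  | succ n ih =>
    rw [fLoop, fDigits]
    by_cases hx : x > 0
    · have hdiv := PySem.Int.floordiv_eq_ediv_of_pos (a := x) (b := 6) (by omega)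
      have hrec := ih (PySem.Int.floordiv x 6)
        (if PySem.Int.mod x 6 > a then PySem.Int.mod x 6 else a)
        (if PySem.Int.mod x 6 < b then PySem.Int.mod x 6 else b)
        (by rw [hdiv]; omega)
      simp only [hx, dite_true, List.foldl, hrec]
      have hmax : (if PySem.Int.mod x 6 > a then PySem.Int.mod x 6 else a)
          = max a (PySem.Int.mod x 6) := by split <;> omega
      have hmin : (if PySem.Int.mod x 6 < b then PySem.Int.mod x 6 else b)
          = min b (PySem.Int.mod x 6) := by split <;> omega
      rw [hmax, hmin]
    · simp [hx]

theorem digit_head_bounds (x d : Int) (t : List Int) (h : fDigits x = d :: t) :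
    0 ≤ d ∧ d < 6 := by
  rw [fDigits] at h
  by_cases hx : x > 0
  · simp only [hx, dite_true] at h
    rw [PySem.Int.mod_eq_emod_of_pos (by omega)] at h
    cases h
    omega
  · simp [hx] at h

-- ===== VERDICT (by name: the statement is the Claim_ definition above) =====
theorem f_spec : Claim_equal_f := by
  intro x _
  unfold Spec_f f f_alt
  rw [fLoop_eq_folds x.toNat x 0 10 le_rfl]
  cases hd : fDigits x with
  | nil => simp [PySem.List.max?, PySem.List.min?]
  | cons d t =>
    have hb := digit_head_bounds x d t hd
    rw [PySem.List.max?_id_cons, PySem.List.min?_id_cons]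
    simp only [List.foldl, Option.getD_some]
    have h0 : max 0 d = d := by omega
    have h10 : min 10 d = d := by omega
    rw [h0, h10]
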